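-- pv_equiv track=rewrite | github.com/Loek21/Protein-folding | code/algorithms/ehaplus.py | permutations_maker
-- ===== SOURCE A (Python) =====
-- import itertools
--
-- def permutations_maker(moves, piece_length):
--     """Makes all permutations for a chain and prunes some easy mistakes"""
--     permutations = [p for p in itertools.product(moves, repeat=piece_length)]
--     perms_pruned = []
--
--     # Prune the permutation list
--     for moveset in permutations:
--         take_moves = True
--
--         # Filter out back and forth moves
--         for move in range(len(moveset) - 1):
--             if moveset[move] == - moveset[move + 1]:
--                 take_moves = False
--                 break
--
--         # Filter out too large straight moves
--         for move in range(len(moveset) - 3):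
--             if moveset[move] == moveset[move + 1] and \
--                  moveset[move] == moveset[move + 2] and \
--                       moveset[move] == moveset[move + 3]:
--                 take_moves = False
--                 break
--
--         # Filter out circular moves
--         for move in range(len(moveset) - 3):
--             if moveset[move] == -moveset[move + 2] and moveset[move + 1] == -moveset[move + 3]:
--                 take_moves = False
--                 break
--
--         if take_moves:
--             perms_pruned.append(moveset)
--
--     return perms_pruned
-- ===== SOURCE B (Python) =====
-- def _ok(prefix, m):
--     n = len(prefix)
--     if n >= 1 and prefix[-1] == -m:
--         return False
--     if n >= 3 and prefix[-1] == m and prefix[-2] == m and prefix[-3] == m: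
--         return False
--     if n >= 3 and prefix[-2] == -m and prefix[-3] == -prefix[-1]:
--         return False
--     return True
--
--
-- def permutations_maker(moves, piece_length):
--     """Grows only still-valid prefixes level by level, pruning whole subtrees,
--     emitting results in the same product order as full enumeration."""
--     frontier = [()]
--     for _ in range(piece_length):
--         if not frontier:
--             break
--         frontier = [p + (m,) for p in frontier for m in moves if _ok(p, m)]
--     return frontier
-- ===== Notes on version B (the rewrite author's own statement) =====
-- stated objective: faster
-- what changed: A materialises all len(moves)^n tuples and filters each with three window scans; B does a backtracking DFS that extends only still-valid prefixes (each new move checked against the last three in O(1)), pruning whole subtrees while emitting results in the same product order.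
import Mathlib
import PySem

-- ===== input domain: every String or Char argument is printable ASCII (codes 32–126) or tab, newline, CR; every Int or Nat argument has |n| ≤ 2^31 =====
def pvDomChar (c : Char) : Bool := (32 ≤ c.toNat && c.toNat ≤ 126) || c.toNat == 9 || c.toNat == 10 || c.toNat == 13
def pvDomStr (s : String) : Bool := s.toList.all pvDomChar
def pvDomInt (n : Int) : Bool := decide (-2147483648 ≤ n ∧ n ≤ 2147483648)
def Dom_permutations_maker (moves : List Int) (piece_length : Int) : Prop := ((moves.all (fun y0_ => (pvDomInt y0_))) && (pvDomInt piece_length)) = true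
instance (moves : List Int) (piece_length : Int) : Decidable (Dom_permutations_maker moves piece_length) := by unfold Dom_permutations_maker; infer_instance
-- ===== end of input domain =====

-- B replaces A's generate-everything-then-filter with a backtracking DFS that extends
-- only still-valid prefixes (pruning whole subtrees), in the same product order: faster.

-- ===== PORT A =====
-- itertools.product(moves, repeat=k): leftmost coordinate varies slowest
def pvProd (moves : List Int) : Nat → List (List Int)
  | 0 => [[]]
  | k + 1 => moves.flatMap (fun m => (pvProd moves k).map (fun r => m :: r))

-- the three pruning loops of A as one boolean check (indices are always in range in A)
def pvCheckA (ms : List Int) : Bool :=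
  let c1 := (List.range (ms.length - 1)).any
    (fun i => ms.getD i 0 == -(ms.getD (i + 1) 0))
  let c2 := (List.range (ms.length - 3)).any
    (fun i => ms.getD i 0 == ms.getD (i + 1) 0 &&
      (ms.getD i 0 == ms.getD (i + 2) 0 && ms.getD i 0 == ms.getD (i + 3) 0))
  let c3 := (List.range (ms.length - 3)).any
    (fun i => ms.getD i 0 == -(ms.getD (i + 2) 0) && ms.getD (i + 1) 0 == -(ms.getD (i + 3) 0))
  !(c1 || c2 || c3)

def permutations_maker (moves : List Int) (piece_length : Int) : List (List Int) :=
  (pvProd moves piece_length.toNat).filter pvCheckA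

-- ===== PORT B =====
-- may this still-valid prefix be extended by move m?  (prefix[-1] = getD (n-1), etc.)
def pvOk (p : List Int) (m : Int) : Bool :=
  let n := p.length
  !( (decide (1 ≤ n) && p.getD (n - 1) 0 == -m)
   || (decide (3 ≤ n) && (p.getD (n - 1) 0 == m &&
        (p.getD (n - 2) 0 == m && p.getD (n - 3) 0 == m)))
   || (decide (3 ≤ n) && (p.getD (n - 2) 0 == -m && p.getD (n - 3) 0 == -(p.getD (n - 1) 0))) )

-- one level of growth: extend every frontier prefix by each admissible move, in order
def pvStep (moves : List Int) (frontier : List (List Int)) : List (List Int) :=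
  frontier.flatMap (fun p => moves.filterMap (fun m => if pvOk p m then some (p ++ [m]) else none))

def pvBfs (moves : List Int) (frontier : List (List Int)) : Nat → List (List Int)
  | 0 => frontier
  | k + 1 => if frontier.isEmpty then frontier else pvBfs moves (pvStep moves frontier) k

def permutations_maker_alt (moves : List Int) (piece_length : Int) : List (List Int) :=
  pvBfs moves [[]] piece_length.toNat

-- ===== PRECONDITION & SPEC =====
-- Pre_ excludes negative piece_length, on which A raises ValueError (itertools.product).
def Pre_permutations_maker (moves : List Int) (piece_length : Int) : Prop := 0 ≤ piece_length
instance (moves : List Int) (piece_length : Int) : Decidable (Pre_permutations_maker moves piece_length) := by unfold Pre_permutations_maker; infer_instance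
def pvWitness_permutations_maker : List Int × Int := ([1, -1], 2)

def Spec_permutations_maker (moves : List Int) (piece_length : Int) (out : List (List Int)) : Prop := out = permutations_maker_alt moves piece_length
instance (moves : List Int) (piece_length : Int) (out : List (List Int)) : Decidable (Spec_permutations_maker moves piece_length out) := by unfold Spec_permutations_maker; infer_instance

-- ===== CLAIM (what is proved, stated in full; the proofs are below) =====
def Claim_equal_permutations_maker : Prop := ∀ (moves : List Int) (piece_length : Int), Dom_permutations_maker moves piece_length → Pre_permutations_maker moves piece_length → Spec_permutations_maker moves piece_length (permutations_maker moves piece_length)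

-- ===== LEMMAS AND PROOFS =====

-- proof-side helper: plain DFS from one prefix (pvBfs is its breadth-first flattening)
def pvDfs (moves : List Int) (p : List Int) : Nat → List (List Int)
  | 0 => [p]
  | k + 1 => moves.flatMap (fun m => if pvOk p m then pvDfs moves (p ++ [m]) k else [])

theorem pvInner (moves : List Int) (p : List Int) (k : Nat) :
    ∀ ms : List Int,
      (ms.filterMap (fun m => if pvOk p m then some (p ++ [m]) else none)).flatMap
        (fun q => pvDfs moves q k)
      = ms.flatMap (fun m => if pvOk p m then pvDfs moves (p ++ [m]) k else []) := by
  intro ms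
  induction ms with
  | nil => simp
  | cons m t iht =>
    by_cases hok : pvOk p m = true <;> simp [hok, iht]

theorem pvBfsEq (moves : List Int) (k : Nat) :
    ∀ frontier, pvBfs moves frontier k = frontier.flatMap (fun p => pvDfs moves p k) := by
  induction k with
  | zero => intro frontier; simp [pvBfs, pvDfs]
  | succ k ih =>
    intro frontier
    by_cases he : frontier.isEmpty
    · rw [List.isEmpty_iff] at he
      simp [pvBfs, he]
    · rw [show pvBfs moves frontier (k + 1) = pvBfs moves (pvStep moves frontier) k from by
        simp [pvBfs, he]]
      rw [ih, pvStep, List.flatMap_assoc]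
      apply List.flatMap_congr
      intro p _
      conv_rhs => rw [pvDfs]
      exact pvInner moves p k moves

theorem pvAnyRangeSucc (f : Nat → Bool) (n : Nat) :
    (List.range (n + 1)).any f = ((List.range n).any f || f n) := by
  simp [List.range_succ]

theorem pvAnyRangeCongr (n : Nat) (f g : Nat → Bool) (h : ∀ i, i < n → f i = g i) :
    (List.range n).any f = (List.range n).any g := by
  induction n with
  | zero => simp
  | succ k ih =>
    simp [List.range_succ, ih (fun i hi => h i (by omega)), h k (by omega)]

theorem pvGetDLt (p q : List Int) (i : Nat) (h : i < p.length) :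
    (p ++ q).getD i 0 = p.getD i 0 := by
  simp [List.getD, List.getElem?_append_left h]

theorem pvGetDLen (p : List Int) (m : Int) :
    (p ++ [m]).getD p.length 0 = m := by
  simp [List.getD]

theorem pvBoolFinal (A1 A2 A3 : Bool) (x1 x2 x3 m : Int) :
    (!(((A1 || x1 == -m) || (A2 || (x3 == x2 && (x3 == x1 && x3 == m)))) || (A3 || (x3 == -x1 && x2 == -m))))
    = (!((A1 || A2) || A3) && !(((true && x1 == -m) || (true && (x1 == m && (x2 == m && x3 == m)))) || (true && (x2 == -m && x3 == -x1)))) := by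
  cases A1 <;> cases A2 <;> cases A3 <;>
    simp only [Bool.false_or, Bool.true_or, Bool.or_false, Bool.or_true, Bool.true_and,
      Bool.not_true, Bool.not_false, Bool.false_and] <;>
    try rfl
  all_goals
    simp only [show ∀ a b : Int, (a == b) = decide (a = b) from fun _ _ => rfl,
      ← Bool.decide_and, ← Bool.decide_or]
    exact congrArg Bool.not (decide_eq_decide.mpr (by omega))

theorem pvCheckStepBig (p : List Int) (m : Int) (hn : 3 ≤ p.length) :
    pvCheckA (p ++ [m]) = (pvCheckA p && pvOk p m) := by
  have h1 : 1 ≤ p.length := by omega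
  simp only [pvCheckA, pvOk, List.length_append, List.length_cons, List.length_nil]
  have e1 : p.length + 1 - 1 = (p.length - 1) + 1 := by omega
  have e3 : p.length + 1 - 3 = (p.length - 3) + 1 := by omega
  rw [e1, e3, pvAnyRangeSucc, pvAnyRangeSucc, pvAnyRangeSucc]
  have ha : p.length - 3 + 1 = p.length - 2 := by omega
  have hb : p.length - 3 + 2 = p.length - 1 := by omega
  have hcc : p.length - 3 + 3 = p.length := by omega
  have hd : p.length - 1 + 1 = p.length := by omega
  rw [ha, hb, hcc, hd]
  have hc1 : (List.range (p.length - 1)).any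
      (fun i => (p ++ [m]).getD i 0 == -((p ++ [m]).getD (i + 1) 0))
      = (List.range (p.length - 1)).any (fun i => p.getD i 0 == -(p.getD (i + 1) 0)) := by
    apply pvAnyRangeCongr
    intro i hi
    rw [pvGetDLt _ _ _ (by omega), pvGetDLt _ _ _ (by omega)]
  have hc2 : (List.range (p.length - 3)).any
      (fun i => (p ++ [m]).getD i 0 == (p ++ [m]).getD (i + 1) 0 &&
        ((p ++ [m]).getD i 0 == (p ++ [m]).getD (i + 2) 0 &&
         (p ++ [m]).getD i 0 == (p ++ [m]).getD (i + 3) 0))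
      = (List.range (p.length - 3)).any
      (fun i => p.getD i 0 == p.getD (i + 1) 0 &&
        (p.getD i 0 == p.getD (i + 2) 0 && p.getD i 0 == p.getD (i + 3) 0)) := by
    apply pvAnyRangeCongr
    intro i hi
    rw [pvGetDLt _ _ _ (by omega), pvGetDLt _ _ _ (by omega), pvGetDLt _ _ _ (by omega),
      pvGetDLt _ _ _ (by omega)]
  have hc3 : (List.range (p.length - 3)).any
      (fun i => (p ++ [m]).getD i 0 == -((p ++ [m]).getD (i + 2) 0) &&
        (p ++ [m]).getD (i + 1) 0 == -((p ++ [m]).getD (i + 3) 0))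
      = (List.range (p.length - 3)).any
      (fun i => p.getD i 0 == -(p.getD (i + 2) 0) && p.getD (i + 1) 0 == -(p.getD (i + 3) 0)) := by
    apply pvAnyRangeCongr
    intro i hi
    rw [pvGetDLt _ _ _ (by omega), pvGetDLt _ _ _ (by omega), pvGetDLt _ _ _ (by omega),
      pvGetDLt _ _ _ (by omega)]
  rw [hc1, hc2, hc3, pvGetDLen,
    pvGetDLt _ _ _ (show p.length - 1 < p.length by omega),
    pvGetDLt _ _ _ (show p.length - 2 < p.length by omega),
    pvGetDLt _ _ _ (show p.length - 3 < p.length by omega)]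
  have d1 : decide (1 ≤ p.length) = true := by simp [h1]
  have d3 : decide (3 ≤ p.length) = true := by simp [hn]
  rw [d1, d3]
  rw [pvBoolFinal]

theorem pvCheckStep (p : List Int) (m : Int) :
    pvCheckA (p ++ [m]) = (pvCheckA p && pvOk p m) := by
  match p with
  | [] => simp [pvCheckA, pvOk]
  | [a] => simp [pvCheckA, pvOk, List.range_succ, List.getD]
  | [a, b] => simp [pvCheckA, pvOk, List.range_succ, List.getD]
  | a :: b :: c :: t => exact pvCheckStepBig _ _ (by simp)

theorem pvCheckAppendFalse (p s : List Int) (h : pvCheckA p = false) :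
    pvCheckA (p ++ s) = false := by
  induction s generalizing p with
  | nil => simpa using h
  | cons a t ih =>
    have : p ++ a :: t = (p ++ [a]) ++ t := by simp
    rw [this]
    exact ih (p ++ [a]) (by rw [pvCheckStep, h]; simp)

theorem pvDfsEq (moves : List Int) (k : Nat) :
    ∀ p, pvCheckA p = true →
      pvDfs moves p k = ((pvProd moves k).map (fun s => p ++ s)).filter pvCheckA := by
  induction k with
  | zero => intro p hp; simp [pvDfs, pvProd, hp]
  | succ k ih =>
    intro p hp
    simp only [pvDfs, pvProd, List.map_flatMap, List.filter_flatMap]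
    refine List.flatMap_congr ?_
    intro m _
    have hsplit : ∀ s : List Int, p ++ m :: s = (p ++ [m]) ++ s := fun s => (List.append_assoc p [m] s).symm
    by_cases hok : pvOk p m = true
    · rw [if_pos hok, ih (p ++ [m]) (by rw [pvCheckStep, hp, hok]; rfl)]
      congr 1
      simp only [List.map_map]
      exact List.map_congr_left (fun s _ => by simp)
    · rw [if_neg hok]
      symm
      rw [List.filter_eq_nil_iff]
      intro a ha
      simp only [List.map_map, List.mem_map, Function.comp] at ha
      obtain ⟨s, _, rfl⟩ := ha
      have hfalse : pvCheckA (p ++ [m]) = false := by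
        rw [pvCheckStep, hp]
        simp [Bool.eq_false_iff.mpr hok]
      have h2 := pvCheckAppendFalse (p ++ [m]) s hfalse
      rw [hsplit s, h2]
      simp

-- ===== VERDICT (by name: the statement is the Claim_ definition above) =====
theorem permutations_maker_spec : Claim_equal_permutations_maker := by
  intro moves piece_length _ _
  unfold Spec_permutations_maker permutations_maker permutations_maker_alt
  rw [pvBfsEq moves piece_length.toNat [[]], List.flatMap_singleton,
    pvDfsEq moves piece_length.toNat [] (by decide)]
  rw [show (fun s : List Int => [] ++ s) = id from funext (fun s => by simp), List.map_id]
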